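-- pv_equiv track=rewrite | github.com/RuohanRYAN/SentimentAnalysis_Naive_Bayes | nblearn3.py | buildFeature
-- ===== SOURCE A (Python) =====
-- def buildFeature(feature_map,pos_cleaned,neg_cleaned,class1,class2):
-- 	data_num = []
-- 	for review in pos_cleaned:
-- 		feat = [0 for i in range(len(feature_map))]
-- 		for word in review:
-- 			if(word in feature_map):
-- 				feat[feature_map[word]]+=1
-- 		data_num.append((feat,class1))
-- 	for review in neg_cleaned:
-- 		feat = [0 for i in range(len(feature_map))]
-- 		for word in review:
-- 			if(word in feature_map):
-- 				feat[feature_map[word]]+=1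
-- 		data_num.append((feat,class2))
-- 	return data_num
-- ===== SOURCE B (Python) =====
-- def buildFeature(feature_map, pos_cleaned, neg_cleaned, class1, class2):
--     def row(review):
--         counts = {}
--         for w in review:
--             counts[w] = counts.get(w, 0) + 1
--         feat = [0] * len(feature_map)
--         for word, idx in feature_map.items():
--             c = counts.get(word, 0)
--             if c:  # absent words contribute nothing
--                 feat[idx] += c
--         return feat
--     return [(row(r), class1) for r in pos_cleaned] + [(row(r), class2) for r in neg_cleaned]
-- ===== Notes on version B (the rewrite author's own statement) =====
-- stated objective: idiomatic
-- what changed: B flips the traversal: it builds a count table of each review once, then fills the zero-initialised feature vector by iterating over the vocabulary (feature_map.items()) and adding each occurring word's count at its index (absent words are skipped), instead of iterating review tokens and incrementing via membership tests; the two review groups become two comprehensions joined by concatenation.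
import Mathlib
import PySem

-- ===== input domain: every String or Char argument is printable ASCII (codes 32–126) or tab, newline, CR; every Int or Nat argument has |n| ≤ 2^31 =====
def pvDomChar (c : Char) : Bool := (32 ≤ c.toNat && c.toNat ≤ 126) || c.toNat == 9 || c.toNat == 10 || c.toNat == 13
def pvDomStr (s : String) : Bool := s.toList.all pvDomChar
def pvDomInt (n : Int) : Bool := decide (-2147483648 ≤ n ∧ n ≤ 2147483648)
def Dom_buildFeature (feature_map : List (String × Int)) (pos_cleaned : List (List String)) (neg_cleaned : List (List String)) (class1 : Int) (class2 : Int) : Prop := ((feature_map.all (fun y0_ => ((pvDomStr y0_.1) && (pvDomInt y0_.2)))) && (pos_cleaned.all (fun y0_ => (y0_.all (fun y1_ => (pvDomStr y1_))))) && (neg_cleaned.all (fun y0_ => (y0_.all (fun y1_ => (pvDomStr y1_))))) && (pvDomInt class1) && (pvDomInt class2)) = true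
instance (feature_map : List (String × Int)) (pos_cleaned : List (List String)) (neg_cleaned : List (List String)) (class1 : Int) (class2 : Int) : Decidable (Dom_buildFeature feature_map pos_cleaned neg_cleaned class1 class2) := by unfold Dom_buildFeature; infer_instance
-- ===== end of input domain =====

-- B builds a per-review count table once and then fills the feature vector by iterating
-- over the vocabulary, adding each occurring word's count at its index (objective: idiomatic;
-- A instead scans review tokens one by one and increments via membership tests).

-- ===== PORT A =====
-- feat[i] += 1, Python semantics via pySetD/pyGetD (exact under Pre_'s in-range indices)
def pvIncAt (feat : List Int) (i : Int) : List Int :=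
  PySem.List.pySetD feat i (PySem.List.pyGetD feat i 0 + 1)

-- the inner loop of A over one review
def buildRowA (feature_map : List (String × Int)) (review : List String) : List Int :=
  review.foldl (fun feat word =>
    match (PySem.Dict.mk feature_map).get? word with
    | some i => pvIncAt feat i
    | none => feat) (List.replicate feature_map.length 0)

def buildFeature (feature_map : List (String × Int)) (pos_cleaned : List (List String)) (neg_cleaned : List (List String)) (class1 : Int) (class2 : Int) : List (List Int × Int) :=
  let data_num : List (List Int × Int) :=
    pos_cleaned.foldl (fun acc review => acc ++ [(buildRowA feature_map review, class1)]) []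
  neg_cleaned.foldl (fun acc review => acc ++ [(buildRowA feature_map review, class2)]) data_num

-- ===== PORT B =====
-- B's row: count the review once, then add counts.get(word, 0) at each vocabulary index,
-- skipping zero counts (absent words contribute nothing)
def buildRowB (feature_map : List (String × Int)) (review : List String) : List Int :=
  let counts : PySem.Dict String Int :=
    review.foldl (fun d w => d.insert w (d.getD w 0 + 1)) PySem.Dict.empty
  feature_map.foldl (fun feat p =>
      let c := counts.getD p.1 0
      if c ≠ 0 then PySem.List.pySetD feat p.2 (PySem.List.pyGetD feat p.2 0 + c) else feat)
    (List.replicate feature_map.length 0)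

def buildFeature_alt (feature_map : List (String × Int)) (pos_cleaned : List (List String)) (neg_cleaned : List (List String)) (class1 : Int) (class2 : Int) : List (List Int × Int) :=
  pos_cleaned.map (fun r => (buildRowB feature_map r, class1))
    ++ neg_cleaned.map (fun r => (buildRowB feature_map r, class2))

-- ===== PRECONDITION & SPEC =====
-- Pre_ excludes exactly the raising inputs: for each review, every vocabulary word occurring in
-- it must carry an index in [-len, len) — otherwise both A and B raise IndexError on that
-- review. Duplicate keys cannot occur in a Python dict, so keys are required distinct.
def Pre_buildFeature (feature_map : List (String × Int)) (pos_cleaned : List (List String)) (neg_cleaned : List (List String)) (class1 : Int) (class2 : Int) : Prop :=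
  (feature_map.map Prod.fst).Nodup ∧
  ∀ r ∈ pos_cleaned ++ neg_cleaned, ∀ p ∈ feature_map, p.1 ∈ r →
    -(feature_map.length : Int) ≤ p.2 ∧ p.2 < feature_map.length
instance (feature_map : List (String × Int)) (pos_cleaned : List (List String)) (neg_cleaned : List (List String)) (class1 : Int) (class2 : Int) : Decidable (Pre_buildFeature feature_map pos_cleaned neg_cleaned class1 class2) := by unfold Pre_buildFeature; infer_instance

def pvWitness_buildFeature : (List (String × Int)) × List (List String) × List (List String) × Int × Int :=
  ([("a", 0), ("b", -1)], [["a", "a", "b"], []], [["c", "a"]], 1, -1)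

def Spec_buildFeature (feature_map : List (String × Int)) (pos_cleaned : List (List String)) (neg_cleaned : List (List String)) (class1 : Int) (class2 : Int) (out : List (List Int × Int)) : Prop := out = buildFeature_alt feature_map pos_cleaned neg_cleaned class1 class2
instance (feature_map : List (String × Int)) (pos_cleaned : List (List String)) (neg_cleaned : List (List String)) (class1 : Int) (class2 : Int) (out : List (List Int × Int)) : Decidable (Spec_buildFeature feature_map pos_cleaned neg_cleaned class1 class2 out) := by unfold Spec_buildFeature; infer_instance

-- ===== CLAIM (what is proved, stated in full; the proofs are below) =====
def Claim_equal_buildFeature : Prop := ∀ (feature_map : List (String × Int)) (pos_cleaned : List (List String)) (neg_cleaned : List (List String)) (class1 : Int) (class2 : Int), Dom_buildFeature feature_map pos_cleaned neg_cleaned class1 class2 → Pre_buildFeature feature_map pos_cleaned neg_cleaned class1 class2 → Spec_buildFeature feature_map pos_cleaned neg_cleaned class1 class2 (buildFeature feature_map pos_cleaned neg_cleaned class1 class2)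

-- ===== LEMMAS AND PROOFS =====

-- the position of the feature vector a Python index i in [-n, n) addresses (negative = wraparound)
def pvEffIdx (n : Nat) (i : Int) : Nat := (if i < 0 then i + n else i).toNat

lemma pyIdx_eff (n : Nat) (i : Int) (h1 : -(n : Int) ≤ i) (h2 : i < n) :
    PySem.List.pyIdx? n i = some (pvEffIdx n i) := by
  simp only [PySem.List.pyIdx?, pvEffIdx]
  by_cases h0 : 0 ≤ i
  · rw [if_pos h0, if_pos h2, if_neg (by omega : ¬ i < 0)]
  · rw [if_neg h0, if_pos h1, if_pos (by omega : i < 0), Option.some.injEq]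
    omega

lemma pySetD_eff (xs : List Int) (i v : Int) (h1 : -(xs.length : Int) ≤ i) (h2 : i < xs.length) :
    PySem.List.pySetD xs i v = xs.set (pvEffIdx xs.length i) v := by
  simp [PySem.List.pySetD, PySem.List.pySet?, pyIdx_eff _ _ h1 h2]

lemma pyGetD_eff (xs : List Int) (i d : Int) (h1 : -(xs.length : Int) ≤ i) (h2 : i < xs.length) :
    PySem.List.pyGetD xs i d = xs.getD (pvEffIdx xs.length i) d := by
  simp [PySem.List.pyGetD, PySem.List.pyGet?, pyIdx_eff _ _ h1 h2, List.getD_eq_getElem?_getD]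

-- getD-level description of feat[i] += c under an in-range (possibly negative) index
lemma pyAddAt_getD (feat : List Int) (i c : Int)
    (h1 : -(feat.length : Int) ≤ i) (h2 : i < feat.length) (j : Nat) (hj : j < feat.length) :
    (PySem.List.pySetD feat i (PySem.List.pyGetD feat i 0 + c)).getD j 0
    = feat.getD j 0 + (if pvEffIdx feat.length i = j then c else 0) := by
  rw [pySetD_eff feat _ _ h1 h2, pyGetD_eff feat _ _ h1 h2]
  have hj' : j < (feat.set (pvEffIdx feat.length i)
      (feat.getD (pvEffIdx feat.length i) 0 + c)).length := by simpa using hj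
  rw [List.getD_eq_getElem _ _ hj', List.getElem_set]
  by_cases h : pvEffIdx feat.length i = j
  · simp [h]
  · simp [h, List.getElem?_eq_getElem hj]

lemma pvIncAt_length (feat : List Int) (i : Int) : (pvIncAt feat i).length = feat.length := by
  simp [pvIncAt, PySem.List.length_pySetD]

lemma pvIncAt_getD (feat : List Int) (i : Int)
    (h1 : -(feat.length : Int) ≤ i) (h2 : i < feat.length) (j : Nat) (hj : j < feat.length) :
    (pvIncAt feat i).getD j 0 = feat.getD j 0 + (if pvEffIdx feat.length i = j then 1 else 0) := by
  unfold pvIncAt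
  exact pyAddAt_getD feat i 1 h1 h2 j hj

-- the A-side fold preserves length and adds, at each valid position j, the number of
-- review words whose feature-map index addresses position j
lemma rowA_fold_spec (fm : List (String × Int)) (review : List String)
    (hr : ∀ w ∈ review, ∀ i : Int, (PySem.Dict.mk fm).get? w = some i →
      -(fm.length : Int) ≤ i ∧ i < fm.length)
    (feat : List Int) (hlen : feat.length = fm.length) :
    (review.foldl (fun feat word =>
        match (PySem.Dict.mk fm).get? word with
        | some i => pvIncAt feat i
        | none => feat) feat).length = fm.length ∧
    ∀ j : Nat, j < fm.length →
      (review.foldl (fun feat word =>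
        match (PySem.Dict.mk fm).get? word with
        | some i => pvIncAt feat i
        | none => feat) feat).getD j 0
      = feat.getD j 0 + (review.countP
          (fun w => ((PySem.Dict.mk fm).get? w).any (fun i => pvEffIdx fm.length i == j)) : Int) := by
  induction review generalizing feat with
  | nil => simp [hlen]
  | cons w ws ih =>
    have hrt : ∀ w' ∈ ws, ∀ i : Int, (PySem.Dict.mk fm).get? w' = some i →
        -(fm.length : Int) ≤ i ∧ i < fm.length := fun w' hw' => hr w' (by simp [hw'])
    simp only [List.foldl_cons]
    cases h : (PySem.Dict.mk fm).get? w with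
    | none =>
      obtain ⟨ihl, ihv⟩ := ih hrt feat hlen
      refine ⟨by simp [ihl], ?_⟩
      intro j hj
      have := ihv j hj
      simp only [] at this ⊢
      rw [this, List.countP_cons]
      simp [h]
    | some i =>
      have hri := hr w (by simp) i h
      have h1 : -(feat.length : Int) ≤ i := by rw [hlen]; exact hri.1
      have h2 : i < feat.length := by rw [hlen]; exact hri.2
      obtain ⟨ihl, ihv⟩ := ih hrt (pvIncAt feat i) (by rw [pvIncAt_length]; exact hlen)
      refine ⟨by simp [ihl], ?_⟩
      intro j hj
      have := ihv j hj
      simp only [] at this ⊢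
      rw [this, pvIncAt_getD feat i h1 h2 j (by omega), List.countP_cons]
      simp only [h, Option.any_some, hlen]
      by_cases hij : pvEffIdx fm.length i = j
      · simp [hij]; ring
      · simp [hij]

-- the B-side fold preserves length and adds g p at the position addressed by p.2, for each pair
lemma foldl_add_getD (l : List (String × Int)) (g : String × Int → Int) (n : Nat)
    (hr : ∀ p ∈ l, -(n : Int) ≤ p.2 ∧ p.2 < (n : Int)) (feat : List Int) (hlen : feat.length = n) :
    (l.foldl (fun ft p => PySem.List.pySetD ft p.2 (PySem.List.pyGetD ft p.2 0 + g p)) feat).length = n ∧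
    ∀ j : Nat, j < n →
      (l.foldl (fun ft p => PySem.List.pySetD ft p.2 (PySem.List.pyGetD ft p.2 0 + g p)) feat).getD j 0
      = feat.getD j 0 + ((l.filter (fun p => pvEffIdx n p.2 == j)).map g).sum := by
  induction l generalizing feat with
  | nil => simp [hlen]
  | cons p t ih =>
    have hrp := hr p (by simp)
    have hrt : ∀ q ∈ t, -(n : Int) ≤ q.2 ∧ q.2 < (n : Int) := fun q hq => hr q (by simp [hq])
    have h1 : -(feat.length : Int) ≤ p.2 := by rw [hlen]; exact hrp.1
    have h2 : p.2 < feat.length := by rw [hlen]; exact hrp.2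
    have hlen' : (PySem.List.pySetD feat p.2 (PySem.List.pyGetD feat p.2 0 + g p)).length = n := by
      rw [PySem.List.length_pySetD]; exact hlen
    obtain ⟨ihl, ihv⟩ := ih hrt _ hlen'
    refine ⟨by simpa using ihl, ?_⟩
    intro j hj
    simp only [List.foldl_cons]
    rw [ihv j hj, pyAddAt_getD feat p.2 (g p) h1 h2 j (by omega), List.filter_cons]
    by_cases hc : pvEffIdx n p.2 = j
    · have hcb : (pvEffIdx n p.2 == j) = true := by simpa using hc
      simp only [hcb, if_true, List.map_cons, List.sum_cons, hlen]
      ring_nf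
      rw [if_pos hc]
      ring
    · have hcb : (pvEffIdx n p.2 == j) = false := by simpa using hc
      simp only [hcb, Bool.false_eq_true, if_false, hlen]
      rw [if_neg hc]
      ring

-- with distinct keys, counting pairs with a given key reduces to the dictionary lookup
lemma countP_fst_nodup (fm : List (String × Int)) (hk : (fm.map Prod.fst).Nodup)
    (w : String) (Q : String × Int → Bool) :
    (fm.countP (fun p => p.1 == w && Q p))
    = match (PySem.Dict.mk fm).get? w with
      | some i => if Q (w, i) then 1 else 0
      | none => 0 := by
  induction fm with
  | nil => simp [PySem.Dict.get?]
  | cons q t ih =>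
    have hcons := List.nodup_cons.mp (show (q.1 :: t.map Prod.fst).Nodup by simpa using hk)
    rw [List.countP_cons, PySem.Dict.get?_mk_cons]
    by_cases hq : q.1 = w
    · have hzero : t.countP (fun p => p.1 == w && Q p) = 0 := by
        rw [List.countP_eq_zero]
        intro p hp hb
        have : p.1 = w := by
          have := (Bool.and_eq_true _ _).mp hb
          simpa using this.1
        exact hcons.1 (by rw [hq, ← this]; exact List.mem_map_of_mem hp)
      have hqw : (q.1 == w) = true := by simpa using hq
      rw [hzero, hqw]
      have : Q (w, q.2) = Q q := by rw [← hq]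
      simp [this]
    · have hqw : (q.1 == w) = false := by simpa using hq
      rw [ih hcons.2, hqw]
      simp

-- double counting: A's per-token count at position j equals B's per-vocabulary-pair sum
lemma countA_eq_sum (fm : List (String × Int)) (hk : (fm.map Prod.fst).Nodup)
    (n : Nat) (j : Nat) (r : List String) :
    ((r.countP (fun w => ((PySem.Dict.mk fm).get? w).any (fun i => pvEffIdx n i == j))) : Int)
    = ((fm.filter (fun p => pvEffIdx n p.2 == j)).map (fun p => (r.count p.1 : Int))).sum := by
  induction r with
  | nil =>
    simp only [List.countP_nil, List.count_nil, Nat.cast_zero]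
    exact (List.sum_eq_zero (by simp)).symm
  | cons w r' ih =>
    rw [List.countP_cons]
    have hsum : ((fm.filter (fun p => pvEffIdx n p.2 == j)).map
        (fun p => ((w :: r').count p.1 : Int))).sum
        = ((fm.filter (fun p => pvEffIdx n p.2 == j)).map (fun p => (r'.count p.1 : Int))).sum
          + ((fm.filter (fun p => pvEffIdx n p.2 == j)).map
              (fun p => if p.1 == w then (1 : Int) else 0)).sum := by
      rw [← PySem.List.sum_map_add_int]
      apply congrArg
      apply List.map_congr_left
      intro p _
      rw [List.count_cons]
      push_cast
      by_cases h : p.1 = w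
      · simp [h]
      · have h1 : (w == p.1) = false := by simpa using (Ne.symm h)
        have h2 : (p.1 == w) = false := by simpa using h
        simp [h1, h2]
    rw [hsum, PySem.List.sum_map_ite_one_zero, List.countP_filter, ← ih]
    have hind : (List.countP (fun p => p.1 == w && (pvEffIdx n p.2 == j)) fm : Int)
        = (if ((PySem.Dict.mk fm).get? w).any (fun i => pvEffIdx n i == j) = true
           then (1 : Int) else 0) := by
      rw [countP_fst_nodup fm hk w (fun p => pvEffIdx n p.2 == j)]
      cases hget : (PySem.Dict.mk fm).get? w with
      | none => simp
      | some i => by_cases hij : pvEffIdx n i = j <;> simp [hij]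
    rw [hind]
    push_cast
    ring

-- dropping the pairs B skips (count 0) does not change the per-position sum
lemma sum_filter_nonzero (l : List (String × Int)) (g : String × Int → Int) (q : String × Int → Bool) :
    ((l.filter (fun p => q p && decide (g p ≠ 0))).map g).sum = ((l.filter q).map g).sum := by
  induction l with
  | nil => simp
  | cons p t ih =>
    simp only [ne_eq, decide_not] at ih ⊢
    by_cases hg : g p = 0 <;> by_cases hq : q p = true <;>
      simp [List.filter_cons, hg, hq, ih]

lemma row_eq (fm : List (String × Int)) (r : List String)
    (hk : (fm.map Prod.fst).Nodup)
    (hb : ∀ p ∈ fm, p.1 ∈ r → -(fm.length : Int) ≤ p.2 ∧ p.2 < fm.length) :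
    buildRowA fm r = buildRowB fm r := by
  unfold buildRowA buildRowB
  -- the count table looked up by B
  set counts : PySem.Dict String Int :=
    r.foldl (fun d w => d.insert w (d.getD w 0 + 1)) PySem.Dict.empty with hcounts
  have hcget : ∀ w : String, counts.getD w 0 = (r.count w : Int) := by
    intro w
    rw [hcounts, PySem.Dict.getD_foldl_insert_add_one]
    simp
  -- B's guarded loop is the unguarded loop over the occurring pairs
  have hguard : fm.foldl (fun feat p =>
        let c := counts.getD p.1 0
        if c ≠ 0 then PySem.List.pySetD feat p.2 (PySem.List.pyGetD feat p.2 0 + c) else feat)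
        (List.replicate fm.length 0)
      = (fm.filter (fun p => decide (counts.getD p.1 0 ≠ 0))).foldl
          (fun feat p => PySem.List.pySetD feat p.2 (PySem.List.pyGetD feat p.2 0 + counts.getD p.1 0))
          (List.replicate fm.length 0) := by
    rw [PySem.List.foldl_ite_eq_foldl_filter]
  rw [hguard]
  have hmemcnt : ∀ p : String × Int, counts.getD p.1 0 ≠ 0 ↔ p.1 ∈ r := by
    intro p
    rw [hcget p.1]
    constructor
    · intro h; exact List.count_pos_iff.mp (by omega)
    · intro h; have := List.count_pos_iff.mpr h; omega
  have hrA : ∀ w ∈ r, ∀ i : Int, (PySem.Dict.mk fm).get? w = some i →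
      -(fm.length : Int) ≤ i ∧ i < fm.length := by
    intro w hw i hget
    exact hb (w, i) (PySem.Dict.mem_items_of_get?_eq_some _ hget) hw
  have hrB : ∀ p ∈ fm.filter (fun p => decide (counts.getD p.1 0 ≠ 0)),
      -(fm.length : Int) ≤ p.2 ∧ p.2 < fm.length := by
    intro p hp
    obtain ⟨hpm, hpr⟩ := List.mem_filter.mp hp
    exact hb p hpm ((hmemcnt p).mp (by simpa using hpr))
  obtain ⟨hAl, hAv⟩ := rowA_fold_spec fm r hrA (List.replicate fm.length 0) (by simp)
  obtain ⟨hBl, hBv⟩ := foldl_add_getD (fm.filter (fun p => decide (counts.getD p.1 0 ≠ 0)))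
      (fun p => counts.getD p.1 0) fm.length hrB (List.replicate fm.length 0) (by simp)
  apply List.ext_getElem (by rw [hAl, hBl])
  intro j hjA hjB
  have hj : j < fm.length := by rw [hAl] at hjA; exact hjA
  rw [← List.getD_eq_getElem _ 0 hjA, ← List.getD_eq_getElem _ 0 hjB, hAv j hj, hBv j hj]
  rw [List.filter_filter,
    sum_filter_nonzero fm (fun p => counts.getD p.1 0) (fun p => pvEffIdx fm.length p.2 == j)]
  have hmap : (fm.filter (fun p => pvEffIdx fm.length p.2 == j)).map (fun p => counts.getD p.1 0)
      = (fm.filter (fun p => pvEffIdx fm.length p.2 == j)).map (fun p => (r.count p.1 : Int)) :=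
    List.map_congr_left (fun p _ => hcget p.1)
  rw [hmap, ← countA_eq_sum fm hk fm.length j r]

-- ===== VERDICT (by name: the statement is the Claim_ definition above) =====
theorem buildFeature_spec : Claim_equal_buildFeature := by
  intro fm pos neg c1 c2 _hdom hpre
  unfold Spec_buildFeature buildFeature buildFeature_alt
  obtain ⟨hk, hrev⟩ := hpre
  simp only [PySem.List.foldl_append_singleton_eq_map, List.nil_append]
  have hrow : ∀ r ∈ pos ++ neg, buildRowA fm r = buildRowB fm r := fun r hr =>
    row_eq fm r hk (hrev r hr)
  have h1 : pos.map (fun x => (buildRowA fm x, c1)) = pos.map (fun x => (buildRowB fm x, c1)) :=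
    List.map_congr_left (fun r h => by rw [hrow r (List.mem_append_left _ h)])
  have h2 : neg.map (fun x => (buildRowA fm x, c2)) = neg.map (fun x => (buildRowB fm x, c2)) :=
    List.map_congr_left (fun r h => by rw [hrow r (List.mem_append_right _ h)])
  rw [h1, h2]
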